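-- pv_equiv track=rewrite | github.com/IonBat/Logic-Circuits | RS FlipFop/Signals.py | GenStream
-- ===== SOURCE A (Python) =====
-- def GenStream(stems):
--     L=len(stems)
--     ls=stems[0]
--     if ls == 0:stream=[0]
--     else:stream=[1]
--
--     for i in range(1,L):
--         if stems[i-1] != stems[i]:
--             stream.append(i)
--
--     stream.append(L)
--     return stream
-- ===== SOURCE B (Python) =====
-- def GenStream(stems):
--     # Run-based traversal: scan maximal runs of equal values; each run start
--     # after the first is a transition index.
--     out = [0 if stems[0] == 0 else 1]
--     n = len(stems)
--     pos = 0
--     while pos < n: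
--         j = pos + 1
--         while j < n and stems[j] == stems[pos]:
--             j += 1
--         if pos > 0:
--             out.append(pos)
--         pos = j
--     out.append(n)
--     return out
-- ===== Notes on version B (the rewrite author's own statement) =====
-- stated objective: alternative
-- what changed: Replaces the index loop comparing each neighbor pair stems[i-1]!=stems[i] with a run-based scan that jumps over maximal runs of equal values and records each run's start index (after the first run) as a transition.
import Mathlib
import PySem

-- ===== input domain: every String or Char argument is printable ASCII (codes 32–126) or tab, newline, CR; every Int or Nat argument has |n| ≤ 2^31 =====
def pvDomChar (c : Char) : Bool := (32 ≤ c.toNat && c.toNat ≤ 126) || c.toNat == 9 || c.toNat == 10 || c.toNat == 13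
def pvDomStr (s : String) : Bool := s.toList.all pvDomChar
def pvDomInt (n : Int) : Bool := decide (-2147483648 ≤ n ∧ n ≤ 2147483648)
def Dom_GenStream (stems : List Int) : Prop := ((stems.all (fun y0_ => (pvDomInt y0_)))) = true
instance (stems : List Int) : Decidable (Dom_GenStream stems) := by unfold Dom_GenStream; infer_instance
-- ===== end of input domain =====

-- B replaces A's neighbor-pair index loop with a run-based scan recording run-start indices (alternative decomposition, same cost).


-- ===== PORT A =====
def GenStream (stems : List Int) : List Int :=
  let L : Int := stems.length
  let ls := PySem.List.pyGetD stems 0 0       -- stems[0]; in range under Pre_ (stems ≠ [])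
  let stream : List Int := if ls = 0 then [0] else [1]
  let stream := (PySem.List.pyRange 1 L 1).foldl
    (fun acc i =>
      if PySem.List.pyGetD stems (i - 1) 0 ≠ PySem.List.pyGetD stems i 0
      then acc ++ [i] else acc) stream
  stream ++ [L]

-- ===== PORT B =====
-- length of the maximal prefix of xs equal to v (B's inner 'while stems[j] == stems[pos]' loop)
def pvRunLen (v : Int) : List Int → Nat
  | [] => 0
  | x :: xs => if x = v then pvRunLen v xs + 1 else 0

-- B's outer while loop over maximal runs: emits each run's start index (after the first run)
def pvRunStarts : List Int → Int → List Int
  | [], _ => []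
  | x :: rest, pos =>
      let k := pvRunLen x rest
      (if pos > 0 then [pos] else []) ++ pvRunStarts (rest.drop k) (pos + 1 + k)
termination_by xs _ => xs.length
decreasing_by simp only [List.length_drop, List.length_cons]; omega

def GenStream_alt (stems : List Int) : List Int :=
  (if PySem.List.pyGetD stems 0 0 = 0 then [0] else [1])
    ++ pvRunStarts stems 0 ++ [(stems.length : Int)]

-- ===== PRECONDITION & SPEC =====
-- A (and B) raise IndexError on the empty list (stems[0]); Pre_ excludes exactly that input.
def Pre_GenStream (stems : List Int) : Prop := stems ≠ []
instance (stems : List Int) : Decidable (Pre_GenStream stems) := by unfold Pre_GenStream; infer_instance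
def pvWitness_GenStream : List Int := [0, 0, 1]

def Spec_GenStream (stems : List Int) (out : List Int) : Prop := out = GenStream_alt stems
instance (stems : List Int) (out : List Int) : Decidable (Spec_GenStream stems out) := by unfold Spec_GenStream; infer_instance

-- ===== CLAIM (what is proved, stated in full; the proofs are below) =====
def Claim_equal_GenStream : Prop := ∀ (stems : List Int), Dom_GenStream stems → Pre_GenStream stems → Spec_GenStream stems (GenStream stems)

-- ===== LEMMAS AND PROOFS =====

-- common characterisation: transition indices by neighbor pairs, starting at position pos
def pvTrans : List Int → Int → List Int
  | x :: y :: rest, pos => (if x = y then [] else [pos + 1]) ++ pvTrans (y :: rest) (pos + 1)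
  | _, _ => []

-- the maximal-run prefix of xs equal to v contributes no transitions
lemma pvTrans_run (v : Int) (xs : List Int) (pos : Int) :
    pvTrans (v :: xs) pos =
      (if (xs.drop (pvRunLen v xs)).isEmpty then []
       else (pos + 1 + (pvRunLen v xs : Int)) ::
            pvTrans (xs.drop (pvRunLen v xs)) (pos + 1 + (pvRunLen v xs : Int))) := by
  induction xs generalizing pos with
  | nil => simp [pvTrans, pvRunLen]
  | cons y ys ih =>
    by_cases h : y = v
    · subst h
      have hk : pvRunLen y (y :: ys) = pvRunLen y ys + 1 := by simp [pvRunLen]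
      have hstep : pvTrans (y :: y :: ys) pos = pvTrans (y :: ys) (pos + 1) := by
        simp [pvTrans]
      rw [hstep, ih (pos + 1), hk]
      have harith : pos + 1 + 1 + (pvRunLen y ys : Int) = pos + 1 + ((pvRunLen y ys : Nat) + 1 : Nat) := by
        push_cast; ring
      simp only [List.drop_succ_cons, harith]
    · have hk : pvRunLen v (y :: ys) = 0 := by simp [pvRunLen, h]
      have hne : v ≠ y := fun hvy => h hvy.symm
      simp [pvTrans, hk, hne]

lemma pvRunStarts_eq_trans_aux (n : Nat) :
    ∀ (xs : List Int), xs.length ≤ n → ∀ (pos : Int), 0 ≤ pos →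
    pvRunStarts xs pos =
      (match xs with | [] => ([] : List Int) | _ :: _ => if pos > 0 then [pos] else []) ++ pvTrans xs pos := by
  induction n with
  | zero =>
    intro xs hlen pos _
    have : xs = [] := List.length_eq_zero_iff.mp (Nat.le_zero.mp hlen)
    subst this; simp [pvRunStarts, pvTrans]
  | succ n ih =>
    intro xs hlen pos hpos
    cases xs with
    | nil => simp [pvRunStarts, pvTrans]
    | cons x rest =>
      have hpk : (0:Int) ≤ pos + 1 + (pvRunLen x rest : Int) := by positivity
      have hlen' : (rest.drop (pvRunLen x rest)).length ≤ n := by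
        simp only [List.length_drop]
        simp only [List.length_cons] at hlen
        omega
      rw [pvRunStarts, ih _ hlen' _ hpk, pvTrans_run]
      have hgt : pos + 1 + (pvRunLen x rest : Int) > 0 := by positivity
      cases hd : rest.drop (pvRunLen x rest) with
      | nil => simp [pvTrans]
      | cons z zs => simp [hgt]

lemma pvRunStarts_eq_trans (xs : List Int) (pos : Int) (hpos : 0 ≤ pos) :
    pvRunStarts xs pos =
      (match xs with | [] => ([] : List Int) | _ :: _ => if pos > 0 then [pos] else []) ++ pvTrans xs pos :=
  pvRunStarts_eq_trans_aux xs.length xs le_rfl pos hpos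

-- A-side: the filtered index range equals pvTrans over the corresponding suffix
lemma pvFilter_eq_trans (stems : List Int) (b : Nat) (ys : List Int)
    (hdrop : stems.drop b = ys) (hb : b ≤ stems.length) :
    ((PySem.List.pyRange ((b : Int) + 1) (stems.length : Int) 1).filter
      (fun i => decide (PySem.List.pyGetD stems (i - 1) 0 ≠ PySem.List.pyGetD stems i 0)))
      = pvTrans ys (b : Int) := by
  induction ys generalizing b with
  | nil =>
    have hlen : stems.length ≤ b := by
      have := congrArg List.length hdrop; simp at this; omega
    rw [PySem.List.pyRange_one_eq_nil (by exact_mod_cast by omega)]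
    simp [pvTrans]
  | cons y ys' ih =>
    have hblt : b < stems.length := by
      have := congrArg List.length hdrop; simp at this; omega
    have hgetb : stems[b]? = some y := by
      have : (stems.drop b)[0]? = some y := by rw [hdrop]; rfl
      rwa [List.getElem?_drop, Nat.add_zero] at this
    cases ys' with
    | nil =>
      have hlen : stems.length = b + 1 := by
        have := congrArg List.length hdrop; simp at this; omega
      rw [PySem.List.pyRange_one_eq_nil (by exact_mod_cast by omega)]
      simp [pvTrans]
    | cons z zs =>
      have hblt1 : b + 1 < stems.length := by
        have := congrArg List.length hdrop; simp at this; omega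
      have hgetb1 : stems[b+1]? = some z := by
        have : (stems.drop b)[1]? = some z := by rw [hdrop]; rfl
        rwa [List.getElem?_drop] at this
      have hdrop1 : stems.drop (b + 1) = z :: zs := by
        rw [← List.drop_drop, hdrop]; rfl
      rw [PySem.List.pyRange_one_cons (by exact_mod_cast by omega)]
      have hv1 : PySem.List.pyGetD stems ((b : Int) + 1 - 1) 0 = y := by
        have e1 : (b : Int) + 1 - 1 = ((b : Nat) : Int) := by ring
        rw [e1, PySem.List.pyGetD_natCast]
        unfold List.getD; rw [hgetb]; rfl
      have hv2 : PySem.List.pyGetD stems ((b : Int) + 1) 0 = z := by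
        have e2 : (b : Int) + 1 = (((b + 1 : Nat)) : Int) := by push_cast; ring
        rw [e2, PySem.List.pyGetD_natCast]
        unfold List.getD; rw [hgetb1]; rfl
      have ihs := ih (b + 1) hdrop1 (by omega)
      have ecast : ((b : Int) + 1) + 1 = (((b + 1 : Nat)) : Int) + 1 := by push_cast; ring
      rw [List.filter_cons]
      simp only [hv1, hv2]
      by_cases hyz : y = z
      · simp only [hyz, ne_eq, not_true_eq_false, decide_false, Bool.false_eq_true, if_false,
          ecast, ihs]
        simp [pvTrans]
      · simp only [ne_eq, hyz, not_false_eq_true, decide_true, if_true, ecast, ihs]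
        simp [pvTrans, hyz]

-- ===== VERDICT (by name: the statement is the Claim_ definition above) =====
theorem GenStream_spec : Claim_equal_GenStream := by
  intro stems _ hpre
  unfold Spec_GenStream
  cases stems with
  | nil => exact absurd rfl hpre
  | cons x rest =>
    show GenStream (x :: rest) = GenStream_alt (x :: rest)
    simp only [GenStream, GenStream_alt]
    rw [PySem.List.foldl_append_ite_eq_filter]
    have hfil := pvFilter_eq_trans (x :: rest) 0 (x :: rest) rfl (by omega)
    simp only [Nat.cast_zero, zero_add] at hfil
    rw [hfil, pvRunStarts_eq_trans (x :: rest) 0 le_rfl]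
    simp
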